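-- pv_equiv track=rewrite | github.com/ormai/notes | Fondamenti di programmazione 1/domjudge/R3.py | sommaDiagonaleSecondariaRicorsiva
-- ===== SOURCE A (Python) =====
-- def sommaDiagonaleSecondariaRicorsiva(matrice, righeColonne):
--     indiceRiga = len(matrice) - righeColonne
--     indiceColonna = righeColonne - 1
--     addendo = matrice[indiceRiga][indiceColonna]
--
--     if indiceRiga == len(matrice) - 1 and indiceColonna == 0:
--         return addendo
--
--     return (sommaDiagonaleSecondariaRicorsiva(matrice, righeColonne - 1)
--         + addendo)
-- ===== SOURCE B (Python) =====
-- def sommaDiagonaleSecondariaRicorsiva(matrice, righeColonne):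
--     totale = 0
--     rc = righeColonne
--     while True:
--         riga = matrice[len(matrice) - rc]
--         totale += riga[rc - 1]
--         if rc == 1:
--             return totale
--         rc -= 1
-- ===== Notes on version B (the rewrite author's own statement) =====
-- stated objective: simpler
-- what changed: Replaces the recursion by an iterative while-loop with a running total, a single rc == 1 base test instead of the two-index comparison, and the row hoisted into its own lookup; it needs no call stack.
import Mathlib
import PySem

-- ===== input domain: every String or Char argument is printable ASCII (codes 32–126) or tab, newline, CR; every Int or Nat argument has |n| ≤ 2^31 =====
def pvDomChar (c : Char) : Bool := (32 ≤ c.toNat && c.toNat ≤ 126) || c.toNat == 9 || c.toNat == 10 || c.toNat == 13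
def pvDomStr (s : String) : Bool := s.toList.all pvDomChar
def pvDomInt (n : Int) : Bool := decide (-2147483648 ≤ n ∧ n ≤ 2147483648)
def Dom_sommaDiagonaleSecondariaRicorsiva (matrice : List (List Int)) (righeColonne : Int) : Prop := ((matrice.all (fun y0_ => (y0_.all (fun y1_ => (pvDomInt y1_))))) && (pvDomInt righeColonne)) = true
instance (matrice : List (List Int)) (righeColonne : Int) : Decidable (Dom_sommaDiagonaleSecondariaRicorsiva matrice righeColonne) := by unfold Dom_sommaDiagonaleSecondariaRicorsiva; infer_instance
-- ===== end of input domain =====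

-- B replaces the recursion by an iterative loop with a running total (and a plain rc == 1 base test); return values agree wherever A returns.

-- ===== PORT A =====
-- Literal port of A's recursion; where Python raises IndexError the access primitive
-- yields none and the port returns 0 there (those inputs are excluded by Pre_).
def sommaDiagonaleSecondariaRicorsiva (matrice : List (List Int)) (righeColonne : Int) : Int :=
  let indiceRiga : Int := (matrice.length : Int) - righeColonne
  let indiceColonna : Int := righeColonne - 1
  match h : (PySem.List.pyGet? matrice indiceRiga).bind
      (fun riga => PySem.List.pyGet? riga indiceColonna) with
  | none => 0
  | some addendo =>
    if indiceRiga = (matrice.length : Int) - 1 ∧ indiceColonna = 0 then addendo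
    else sommaDiagonaleSecondariaRicorsiva matrice (righeColonne - 1) + addendo
termination_by righeColonne.toNat
decreasing_by
  obtain ⟨riga, hr, _⟩ := Option.bind_eq_some_iff.mp h
  have := PySem.List.pyGet?_eq_none_iff (xs := matrice) (i := (matrice.length : Int) - righeColonne)
  rw [hr] at this
  simp only [reduceCtorEq, false_iff, not_not] at this
  unfold PySem.Raise.InRange at this
  omega

-- ===== PORT B =====
-- Iterative loop of Source B as tail recursion on the loop state (totale, rc); where
-- Python raises IndexError the lookup yields none and the loop stops with totale
-- (those inputs are excluded by Pre_).
def pvLoop_sommaDiagonaleSecondariaRicorsiva (matrice : List (List Int)) (totale : Int) (rc : Int) : Int :=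
  match h : PySem.List.pyGet? matrice ((matrice.length : Int) - rc) with
  | none => totale
  | some riga =>
    match PySem.List.pyGet? riga (rc - 1) with
    | none => totale
    | some v =>
      if rc = 1 then totale + v
      else pvLoop_sommaDiagonaleSecondariaRicorsiva matrice (totale + v) (rc - 1)
termination_by rc.toNat
decreasing_by
  have := PySem.List.pyGet?_eq_none_iff (xs := matrice) (i := (matrice.length : Int) - rc)
  rw [h] at this
  simp only [reduceCtorEq, false_iff, not_not] at this
  unfold PySem.Raise.InRange at this
  omega

def sommaDiagonaleSecondariaRicorsiva_alt (matrice : List (List Int)) (righeColonne : Int) : Int :=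
  pvLoop_sommaDiagonaleSecondariaRicorsiva matrice 0 righeColonne

-- ===== PRECONDITION & SPEC =====
-- Pre_ holds exactly when the Python A returns normally: righeColonne ≥ 1 and every
-- anti-diagonal access matrice[n-k][k-1] for k = 1..righeColonne is in Python range.
-- (the bound righeColonne ≤ 2·len and the min in the range are forced by the k = righeColonne
-- access itself, so they exclude nothing; they only keep the condition cheap to decide)
def Pre_sommaDiagonaleSecondariaRicorsiva (matrice : List (List Int)) (righeColonne : Int) : Prop :=
  1 ≤ righeColonne ∧ righeColonne ≤ 2 * (matrice.length : Int) ∧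
  ∀ k ∈ PySem.List.pyRange 1 (min (righeColonne + 1) (2 * (matrice.length : Int) + 1)) 1,
    PySem.Raise.InRange matrice.length ((matrice.length : Int) - k) ∧
    PySem.Raise.InRange (PySem.List.pyGetD matrice ((matrice.length : Int) - k) []).length (k - 1)
instance (matrice : List (List Int)) (righeColonne : Int) : Decidable (Pre_sommaDiagonaleSecondariaRicorsiva matrice righeColonne) := by unfold Pre_sommaDiagonaleSecondariaRicorsiva; infer_instance
def pvWitness_sommaDiagonaleSecondariaRicorsiva : List (List Int) × Int := ([[1, 2], [3, 4]], 2)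

def Spec_sommaDiagonaleSecondariaRicorsiva (matrice : List (List Int)) (righeColonne : Int) (out : Int) : Prop := out = sommaDiagonaleSecondariaRicorsiva_alt matrice righeColonne
instance (matrice : List (List Int)) (righeColonne : Int) (out : Int) : Decidable (Spec_sommaDiagonaleSecondariaRicorsiva matrice righeColonne out) := by unfold Spec_sommaDiagonaleSecondariaRicorsiva; infer_instance

-- ===== CLAIM (what is proved, stated in full; the proofs are below) =====
def Claim_equal_sommaDiagonaleSecondariaRicorsiva : Prop := ∀ (matrice : List (List Int)) (righeColonne : Int), Dom_sommaDiagonaleSecondariaRicorsiva matrice righeColonne → Pre_sommaDiagonaleSecondariaRicorsiva matrice righeColonne → Spec_sommaDiagonaleSecondariaRicorsiva matrice righeColonne (sommaDiagonaleSecondariaRicorsiva matrice righeColonne)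

-- ===== LEMMAS AND PROOFS =====

-- Under an in-range condition the Option-valued lookup succeeds and yields the
-- total lookup (with any default).
theorem pv_get_some {α : Type} (xs : List α) (i : Int) (d : α)
    (h : PySem.Raise.InRange xs.length i) :
    PySem.List.pyGet? xs i = some (PySem.List.pyGetD xs i d) := by
  cases hg : PySem.List.pyGet? xs i with
  | none => rw [PySem.List.pyGet?_eq_none_iff] at hg; exact absurd h hg
  | some v => simp [PySem.List.pyGetD, hg]

-- One loop pass of port B, under the in-range conditions for step rc.
theorem pv_loop_pass (m : List (List Int)) (t rc : Int)
    (h1 : PySem.Raise.InRange m.length ((m.length : Int) - rc))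
    (h2 : PySem.Raise.InRange (PySem.List.pyGetD m ((m.length : Int) - rc) []).length (rc - 1)) :
    pvLoop_sommaDiagonaleSecondariaRicorsiva m t rc
      = (if rc = 1 then t + PySem.List.pyGetD (PySem.List.pyGetD m ((m.length : Int) - rc) []) (rc - 1) 0
         else pvLoop_sommaDiagonaleSecondariaRicorsiva m
           (t + PySem.List.pyGetD (PySem.List.pyGetD m ((m.length : Int) - rc) []) (rc - 1) 0) (rc - 1)) := by
  rw [pvLoop_sommaDiagonaleSecondariaRicorsiva, pv_get_some m _ [] h1]
  split
  next heq => exact absurd heq (by simp)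
  next riga heq =>
    injection heq with he; subst he
    rw [pv_get_some _ _ (0 : Int) h2]

-- One unfolding of port A, under the same in-range conditions.
theorem pv_rec_pass (m : List (List Int)) (rc : Int)
    (h1 : PySem.Raise.InRange m.length ((m.length : Int) - rc))
    (h2 : PySem.Raise.InRange (PySem.List.pyGetD m ((m.length : Int) - rc) []).length (rc - 1)) :
    sommaDiagonaleSecondariaRicorsiva m rc
      = (if (m.length : Int) - rc = (m.length : Int) - 1 ∧ rc - 1 = 0
         then PySem.List.pyGetD (PySem.List.pyGetD m ((m.length : Int) - rc) []) (rc - 1) 0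
         else sommaDiagonaleSecondariaRicorsiva m (rc - 1)
           + PySem.List.pyGetD (PySem.List.pyGetD m ((m.length : Int) - rc) []) (rc - 1) 0) := by
  rw [sommaDiagonaleSecondariaRicorsiva]
  rw [pv_get_some m _ [] h1]
  simp only [Option.bind_some]
  rw [pv_get_some _ _ (0 : Int) h2]

theorem pv_main (j : Nat) (m : List (List Int)) (t : Int)
    (hpre : Pre_sommaDiagonaleSecondariaRicorsiva m ((j : Int) + 1)) :
    pvLoop_sommaDiagonaleSecondariaRicorsiva m t ((j : Int) + 1)
      = t + sommaDiagonaleSecondariaRicorsiva m ((j : Int) + 1) := by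
  induction j generalizing t with
  | zero =>
    simp only [Nat.cast_zero, zero_add] at hpre ⊢
    have h2n := hpre.2.1
    have hk := hpre.2.2 1 (by rw [PySem.List.mem_pyRange_one]; omega)
    rw [pv_loop_pass m t 1 hk.1 hk.2, pv_rec_pass m 1 hk.1 hk.2]
    rw [if_pos rfl, if_pos (by norm_num)]
  | succ i ih =>
    have hcast : (((i+1 : ℕ)) : Int) + 1 = (i:Int) + 1 + 1 := by push_cast; ring
    rw [hcast] at hpre ⊢
    have h2n := hpre.2.1
    have hpre' : Pre_sommaDiagonaleSecondariaRicorsiva m ((i:Int)+1) := by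
      refine ⟨by omega, by omega, fun k hk => ?_⟩
      exact hpre.2.2 k (by rw [PySem.List.mem_pyRange_one] at hk ⊢; omega)
    have hk := hpre.2.2 ((i:Int)+1+1) (by rw [PySem.List.mem_pyRange_one]; omega)
    rw [pv_loop_pass m t _ hk.1 hk.2, pv_rec_pass m _ hk.1 hk.2]
    rw [if_neg (by omega), if_neg (by rintro ⟨-, hc⟩; omega)]
    have hr1 : (i:Int) + 1 + 1 - 1 = (i:Int) + 1 := by ring
    rw [hr1, ih _ hpre']
    ring

-- ===== VERDICT (by name: the statement is the Claim_ definition above) =====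
theorem sommaDiagonaleSecondariaRicorsiva_spec : Claim_equal_sommaDiagonaleSecondariaRicorsiva := by
  intro m rc _ hpre
  unfold Spec_sommaDiagonaleSecondariaRicorsiva sommaDiagonaleSecondariaRicorsiva_alt
  have h1 := hpre.1
  have hrc : rc = ((rc - 1).toNat : Int) + 1 := by omega
  rw [hrc] at hpre ⊢
  rw [pv_main (rc - 1).toNat m 0 hpre]
  ring
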